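-- pv_equiv track=rewrite | github.com/omnisc13nt/MalAware | remove_comments.py | remove_cpp_comments
-- ===== SOURCE A (Python) =====
-- def remove_cpp_comments(content):
--     """Remove C++ style comments from source code while preserving strings."""
--     # State tracking
--     in_string = False
--     in_char = False
--     in_single_comment = False
--     in_multi_comment = False
--     escaped = False
--
--     result = []
--     i = 0
--     length = len(content)
--
--     while i < length:
--         char = content[i]
--
--         # Handle escape sequences
--         if escaped:
--             result.append(char)
--             escaped = False
--             i += 1
--             continue
--
--         if char == '\\' and (in_string or in_char):
--             escaped = True
--             result.append(char)
--             i += 1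
--             continue
--
--         # Handle string literals
--         if char == '"' and not in_char and not in_single_comment and not in_multi_comment:
--             in_string = not in_string
--             result.append(char)
--             i += 1
--             continue
--
--         # Handle character literals
--         if char == "'" and not in_string and not in_single_comment and not in_multi_comment:
--             in_char = not in_char
--             result.append(char)
--             i += 1
--             continue
--
--         # Skip if we're in a string or character literal
--         if in_string or in_char:
--             result.append(char)
--             i += 1
--             continue
--
--         # Handle end of single-line comment
--         if in_single_comment:
--             if char == '\n':
--                 in_single_comment = False
--                 result.append(char)  # Keep the newline
--             i += 1
--             continue
--
--         # Handle end of multi-line comment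
--         if in_multi_comment:
--             if char == '*' and i + 1 < length and content[i + 1] == '/':
--                 in_multi_comment = False
--                 i += 2  # Skip both * and /
--                 continue
--             i += 1
--             continue
--
--         # Check for start of comments
--         if char == '/':
--             if i + 1 < length:
--                 next_char = content[i + 1]
--                 if next_char == '/':
--                     in_single_comment = True
--                     i += 2
--                     continue
--                 elif next_char == '*':
--                     in_multi_comment = True
--                     i += 2
--                     continue
--
--         # Regular character
--         result.append(char)
--         i += 1
--
--     return ''.join(result)
-- ===== SOURCE B (Python) =====
-- def remove_cpp_comments(content):
--     """Remove C++ style comments from source code while preserving strings.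
--
--     Mode-dispatched scanner: instead of one flat loop over boolean flags,
--     each lexical mode (string/char literal, line comment, block comment)
--     is consumed by its own dedicated inner scan.
--     """
--     out = []
--     i = 0
--     n = len(content)
--     while i < n:
--         c = content[i]
--         if c == '"' or c == "'":
--             # string / character literal: copy verbatim, honouring escapes
--             q = c
--             out.append(c)
--             i += 1
--             while i < n:
--                 d = content[i]
--                 if d == '\\':
--                     out.append(d)
--                     if i + 1 < n:
--                         out.append(content[i + 1])
--                     i += 2
--                 elif d == q:
--                     out.append(d)
--                     i += 1
--                     break
--                 else:
--                     out.append(d)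
--                     i += 1
--         elif c == '/' and i + 1 < n and content[i + 1] == '/':
--             # line comment: drop up to (and keep) the newline
--             i += 2
--             while i < n and content[i] != '\n':
--                 i += 1
--             if i < n:
--                 out.append('\n')
--                 i += 1
--         elif c == '/' and i + 1 < n and content[i + 1] == '*':
--             # block comment: drop through the closing */
--             i += 2
--             while i < n:
--                 if content[i] == '*' and i + 1 < n and content[i + 1] == '/':
--                     i += 2
--                     break
--                 i += 1
--         else:
--             out.append(c)
--             i += 1
--     return ''.join(out)
-- ===== Notes on version B (the rewrite author's own statement) =====
-- stated objective: simpler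
-- what changed: Replaced A's single flat loop threading five boolean state flags (in_string/in_char/in_single_comment/in_multi_comment/escaped) by a mode-dispatched scanner in which each lexical mode (string or char literal, line comment, block comment) is consumed by its own dedicated inner scan, eliminating all boolean state.
import Mathlib
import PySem

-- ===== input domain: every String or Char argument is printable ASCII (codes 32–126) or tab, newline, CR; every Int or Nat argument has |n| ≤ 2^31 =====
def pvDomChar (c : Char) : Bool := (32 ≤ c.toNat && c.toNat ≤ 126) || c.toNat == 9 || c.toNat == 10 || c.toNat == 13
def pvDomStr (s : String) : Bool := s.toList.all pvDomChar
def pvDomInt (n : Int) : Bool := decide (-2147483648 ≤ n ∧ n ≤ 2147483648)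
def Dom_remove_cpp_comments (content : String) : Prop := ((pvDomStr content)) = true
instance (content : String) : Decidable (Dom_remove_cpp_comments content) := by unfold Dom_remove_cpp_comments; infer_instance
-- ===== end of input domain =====

-- B replaces A's flat loop over five boolean flags by a mode-dispatched scanner
-- (a dedicated inner scan per lexical mode); objective: simpler, same cost.

-- ===== PORT A =====
-- A's while-loop over index i with flags; the remaining suffix content[i:] is the
-- recursion argument, content[i+1] is rest.head?, 'i += 2' is rest.tail.
def aRun (instr inch sc mc esc : Bool) : List Char → List Char
  | [] => []
  | c :: rest =>
    if esc then c :: aRun instr inch sc mc false rest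
    else if c = '\\' ∧ (instr ∨ inch) then c :: aRun instr inch sc mc true rest
    else if c = '"' ∧ ¬inch ∧ ¬sc ∧ ¬mc then c :: aRun (!instr) inch sc mc false rest
    else if c = '\'' ∧ ¬instr ∧ ¬sc ∧ ¬mc then c :: aRun instr (!inch) sc mc false rest
    else if instr ∨ inch then c :: aRun instr inch sc mc false rest
    else if sc then
      (if c = '\n' then '\n' :: aRun instr inch false mc false rest
       else aRun instr inch sc mc false rest)
    else if mc then
      (if c = '*' ∧ rest.head? = some '/' then aRun instr inch sc false false rest.tail
       else aRun instr inch sc mc false rest)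
    else if c = '/' ∧ rest.head? = some '/' then aRun instr inch true mc false rest.tail
    else if c = '/' ∧ rest.head? = some '*' then aRun instr inch sc true false rest.tail
    else c :: aRun instr inch sc mc false rest
  termination_by cs => cs.length
  decreasing_by all_goals (simp [List.length_tail] <;> omega)

def remove_cpp_comments (content : String) : String :=
  String.ofList (aRun false false false false false content.toList)

-- ===== PORT B =====
mutual
-- Source B's outer loop in code mode
def bCode : List Char → List Char
  | [] => []
  | c :: rest =>
    if c = '"' ∨ c = '\'' then c :: bString c rest
    else if c = '/' ∧ rest.head? = some '/' then bLine rest.tail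
    else if c = '/' ∧ rest.head? = some '*' then bBlock rest.tail
    else c :: bCode rest
  termination_by cs => cs.length
  decreasing_by all_goals (simp [List.length_tail] <;> omega)
-- Source B's inner scan copying a string/char literal verbatim
def bString (q : Char) : List Char → List Char
  | [] => []
  | d :: rest =>
    if d = '\\' then
      d :: (match rest with
            | [] => []
            | e :: rest' => e :: bString q rest')
    else if d = q then d :: bCode rest
    else d :: bString q rest
  termination_by cs => cs.length
  decreasing_by all_goals (simp [List.length_tail] <;> omega)
-- Source B's inner scan dropping a line comment (keeps the newline)
def bLine : List Char → List Char
  | [] => []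
  | d :: rest => if d = '\n' then '\n' :: bCode rest else bLine rest
  termination_by cs => cs.length
  decreasing_by all_goals (simp [List.length_tail] <;> omega)
-- Source B's inner scan dropping a block comment
def bBlock : List Char → List Char
  | [] => []
  | d :: rest =>
    if d = '*' ∧ rest.head? = some '/' then bCode rest.tail else bBlock rest
  termination_by cs => cs.length
  decreasing_by all_goals (simp [List.length_tail] <;> omega)
end

def remove_cpp_comments_alt (content : String) : String :=
  String.ofList (bCode content.toList)

-- ===== PRECONDITION & SPEC =====
def Spec_remove_cpp_comments (content : String) (out : String) : Prop := out = remove_cpp_comments_alt content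
instance (content : String) (out : String) : Decidable (Spec_remove_cpp_comments content out) := by unfold Spec_remove_cpp_comments; infer_instance

-- ===== CLAIM (what is proved, stated in full; the proofs are below) =====
def Claim_equal_remove_cpp_comments : Prop := ∀ (content : String), Dom_remove_cpp_comments content → Spec_remove_cpp_comments content (remove_cpp_comments content)

-- ===== LEMMAS AND PROOFS =====

-- A's five reachable states versus B's four modes, one joint strong induction.
lemma pv_main : ∀ (n : Nat) (cs : List Char), cs.length ≤ n →
    aRun false false false false false cs = bCode cs ∧
    aRun true false false false false cs = bString '"' cs ∧
    aRun false true false false false cs = bString '\'' cs ∧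
    aRun false false true false false cs = bLine cs ∧
    aRun false false false true false cs = bBlock cs := by
  intro n
  induction n with
  | zero =>
    intro cs h
    have : cs = [] := by cases cs <;> simp_all
    subst this
    simp [aRun, bCode, bString, bLine, bBlock]
  | succ n ih =>
    intro cs h
    cases cs with
    | nil => simp [aRun, bCode, bString, bLine, bBlock]
    | cons c rest =>
      have hr : rest.length ≤ n := by simpa using h
      have hrt : rest.tail.length ≤ n := by
        have := List.length_tail (l := rest); omega
      refine ⟨?_, ?_, ?_, ?_, ?_⟩
      · -- code mode
        by_cases hq : c = '"'
        · subst hq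
          simp [aRun, bCode, (ih rest hr).1, (ih rest hr).2.1]
        · by_cases hq' : c = '\''
          · subst hq'
            simp [aRun, bCode, (ih rest hr).1, (ih rest hr).2.2.1]
          · by_cases hl : c = '/' ∧ rest.head? = some '/'
            · simp [aRun, bCode, hq, hq', hl, (ih rest.tail hrt).2.2.2.1]
            · by_cases hb : c = '/' ∧ rest.head? = some '*'
              · simp [aRun, bCode, hq, hq', hl, hb, (ih rest.tail hrt).2.2.2.2]
              · simp [aRun, bCode, hq, hq', hl, hb, (ih rest hr).1]
      · -- string mode, q = '"'
        by_cases he : c = '\\'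
        · subst he
          cases rest with
          | nil => simp [aRun, bString]
          | cons e rest' =>
            have hr' : rest'.length ≤ n := by simp at h; omega
            simp [aRun, bString, (ih rest' hr').2.1]
        · by_cases hq : c = '"'
          · subst hq
            rw [bString.eq_def]; simp [aRun, (ih rest hr).1]
          · rw [bString.eq_def]; simp [aRun, he, hq, (ih rest hr).2.1]
      · -- char mode, q = '\''
        by_cases he : c = '\\'
        · subst he
          cases rest with
          | nil => simp [aRun, bString]
          | cons e rest' =>
            have hr' : rest'.length ≤ n := by simp at h; omega
            simp [aRun, bString, (ih rest' hr').2.2.1]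
        · by_cases hq : c = '\''
          · subst hq
            rw [bString.eq_def]; simp [aRun, (ih rest hr).1]
          · rw [bString.eq_def]; simp [aRun, he, hq, (ih rest hr).2.2.1]
      · -- line-comment mode
        by_cases hn : c = '\n'
        · subst hn
          simp [aRun, bLine, (ih rest hr).1]
        · simp [aRun, bLine, hn, (ih rest hr).2.2.2.1]
      · -- block-comment mode
        by_cases hc : c = '*' ∧ rest.head? = some '/'
        · simp [aRun, bBlock, hc, (ih rest.tail hrt).1]
        · simp [aRun, bBlock, hc, (ih rest hr).2.2.2.2]

-- ===== VERDICT (by name: the statement is the Claim_ definition above) =====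
theorem remove_cpp_comments_spec : Claim_equal_remove_cpp_comments := by
  intro content _
  unfold Spec_remove_cpp_comments remove_cpp_comments remove_cpp_comments_alt
  rw [(pv_main content.toList.length content.toList le_rfl).1]
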